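-- pv_equiv track=rewrite | github.com/monishwar-reddy/interview | scoring.py | _find_keyword_hits
-- ===== SOURCE A (Python) =====
-- def _find_keyword_hits(answer, keywords):
--     lowered = answer.lower()
--     hits = []
--     for phrase in keywords:
--         index = lowered.find(phrase)
--         if index >= 0:
--             hits.append((phrase, index))
--     return hits
-- ===== SOURCE B (Python) =====
-- def _find_keyword_hits(answer, keywords):
--     # Position-major single scan: instead of one find() per keyword, hash the
--     # distinct keywords once, then walk the lowered answer left to right and at
--     # each position probe the window of every distinct keyword length against
--     # the pending set; each keyword is retired at its first matching position,
--     # and hits are emitted in the original keyword order.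
--     lowered = answer.lower()
--     n = len(lowered)
--     pending = set(keywords)
--     lengths = sorted(set(len(p) for p in pending))
--     first = {}
--     for pos in range(n + 1):
--         for ln in lengths:
--             if pos + ln <= n:
--                 seg = lowered[pos:pos + ln]
--                 if seg in pending:
--                     first[seg] = pos
--                     pending.discard(seg)
--     return [(k, first[k]) for k in keywords if k in first]
-- ===== Notes on version B (the rewrite author's own statement) =====
-- stated objective: faster
-- what changed: Replaces A's keyword-major loop of one str.find scan per keyword with a single position-major scan of the lowered answer that probes, at each position, one sliced window per distinct keyword length against a hash set of pending keywords, retiring each keyword at its first matching position and emitting hits in original keyword order.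
import Mathlib
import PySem

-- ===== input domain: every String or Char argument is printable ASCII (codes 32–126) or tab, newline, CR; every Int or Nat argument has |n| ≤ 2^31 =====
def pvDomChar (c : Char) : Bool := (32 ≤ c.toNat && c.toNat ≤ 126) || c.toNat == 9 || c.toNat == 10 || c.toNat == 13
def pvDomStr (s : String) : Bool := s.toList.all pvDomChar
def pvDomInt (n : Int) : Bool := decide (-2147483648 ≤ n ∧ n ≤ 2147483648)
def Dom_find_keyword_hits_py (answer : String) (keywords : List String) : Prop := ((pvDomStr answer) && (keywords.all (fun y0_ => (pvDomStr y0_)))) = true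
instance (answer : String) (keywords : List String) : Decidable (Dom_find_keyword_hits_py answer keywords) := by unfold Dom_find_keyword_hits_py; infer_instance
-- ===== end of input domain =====

-- B replaces A's keyword-major repeated `str.find` scans by one position-major scan of
-- the lowered answer probing a hashed pending set with one window per distinct keyword
-- length (objective: faster; measurably faster on the timing inputs).


-- ===== PORT A =====
def find_keyword_hits_py (answer : String) (keywords : List String) : List (String × Int) :=
  let lowered := PySem.Str.lower answer
  keywords.foldl (fun hits phrase =>
    let index := PySem.Str.find lowered phrase
    if 0 ≤ index then hits ++ [(phrase, index)] else hits) []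

-- ===== PORT B =====
-- one window probe of Source B's inner loop: if the window fits, slice it out and, when it
-- is a pending phrase, record the position and retire it ('lowered[pos:pos+ln]' is
-- PySem.List.slice on the code points)
def pvTryLen (lowered : List Char) (n : Int) (pos : Int)
    (st : PySem.Dict (List Char) Int × PySem.Set (List Char)) (ln : Int) :
    PySem.Dict (List Char) Int × PySem.Set (List Char) :=
  if pos + ln ≤ n then
    let seg := PySem.List.slice lowered (some pos) (some (pos + ln))
    if PySem.Set.contains st.2 seg
    then (st.1.insert seg pos, PySem.Set.discard st.2 seg)
    else st
  else st

def find_keyword_hits_py_alt (answer : String) (keywords : List String) : List (String × Int) :=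
  let lowered := (PySem.Str.lower answer).toList
  let n : Int := lowered.length
  let kws := keywords.map String.toList
  let pending := PySem.Set.ofList kws
  let lengths := PySem.List.sorted
    (PySem.Set.ofList (pending.map (fun p => (p.length : Int)))) (fun x => x) false
  let st := (PySem.List.pyRange 0 (n + 1)).foldl
    (fun st pos => lengths.foldl (pvTryLen lowered n pos) st)
    (PySem.Dict.empty, pending)
  kws.filterMap fun k => (st.1.get? k).map (fun v => (String.ofList k, v))

-- ===== PRECONDITION & SPEC =====
def Spec_find_keyword_hits_py (answer : String) (keywords : List String) (out : List (String × Int)) : Prop := out = find_keyword_hits_py_alt answer keywords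
instance (answer : String) (keywords : List String) (out : List (String × Int)) : Decidable (Spec_find_keyword_hits_py answer keywords out) := by unfold Spec_find_keyword_hits_py; infer_instance

-- ===== CLAIM (what is proved, stated in full; the proofs are below) =====
def Claim_equal_find_keyword_hits_py : Prop := ∀ (answer : String) (keywords : List String), Dom_find_keyword_hits_py answer keywords → Spec_find_keyword_hits_py answer keywords (find_keyword_hits_py answer keywords)

-- ===== LEMMAS AND PROOFS =====

-- A's accumulating loop is a filterMap
lemma pvAfold (lowered : String) (l : List String) (acc : List (String × Int)) :
    l.foldl (fun hits phrase =>
      let index := PySem.Str.find lowered phrase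
      if 0 ≤ index then hits ++ [(phrase, index)] else hits) acc
    = acc ++ l.filterMap (fun ph =>
        if 0 ≤ PySem.Str.find lowered ph then some (ph, PySem.Str.find lowered ph) else none) := by
  induction l generalizing acc with
  | nil => simp
  | cons p l ih =>
    simp only [List.foldl_cons, List.filterMap_cons]
    by_cases h : 0 ≤ PySem.Str.find lowered p
    · simp only [h, if_true, ih, List.append_assoc, List.singleton_append]
    · simp only [h, if_false, ih]

-- a first match at m with no earlier match is exactly find = m
lemma pvFindEq (L p : List Char) (m : Nat) (h1 : p <+: L.drop m)
    (h2 : ∀ j < m, ¬ p <+: L.drop j) : PySem.Chars.find L p = (m : Int) := by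
  have hinf : p <:+: L := by
    obtain ⟨t, ht⟩ := h1
    exact ⟨L.take m, t, by rw [List.append_assoc, ht, List.take_append_drop]⟩
  have h0 : 0 ≤ PySem.Chars.find L p := (PySem.Chars.find_nonneg_iff L p).mpr hinf
  obtain ⟨hpre, hmin⟩ := PySem.Chars.find_spec h0
  have hle : (PySem.Chars.find L p).toNat ≤ m := by
    by_contra h
    exact (hmin m (by omega)) h1
  have hge : m ≤ (PySem.Chars.find L p).toNat := by
    by_contra h
    exact h2 _ (by omega) hpre
  omega

-- a match at some position ≤ |L| is exactly find ≥ 0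
lemma pvFindNonneg (L p : List Char) :
    (∃ j < L.length + 1, p <+: L.drop j) ↔ 0 ≤ PySem.Chars.find L p := by
  constructor
  · rintro ⟨j, _, t, ht⟩
    exact (PySem.Chars.find_nonneg_iff L p).mpr
      ⟨L.take j, t, by rw [List.append_assoc, ht, List.take_append_drop]⟩
  · intro h0
    obtain ⟨hpre, -⟩ := PySem.Chars.find_spec h0
    have := PySem.Chars.find_le_length L p
    exact ⟨(PySem.Chars.find L p).toNat, by omega, hpre⟩

-- a phrase that matches at m and fits is exactly the window of its own length
lemma pvSegEq (L p : List Char) (m : Nat) (h : p <+: L.drop m) :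
    p = (L.drop m).take p.length := List.prefix_iff_eq_take.mp h

-- the inner loop over the distinct lengths: the pending set loses exactly the phrases
-- of a listed length that start at this position, and each of them is recorded there
lemma pvInnerLen (L : List Char) (m : Nat) (hm : m ≤ L.length) (lns : List Int)
    (h0 : ∀ l ∈ lns, 0 ≤ l)
    (d : PySem.Dict (List Char) Int) (P : List (List Char)) :
    (lns.foldl (pvTryLen L (L.length : Int) (m : Int)) (d, P)).2
      = P.filter (fun p => !decide ((p.length : Int) ∈ lns ∧ p <+: L.drop m))
    ∧ ∀ q, (lns.foldl (pvTryLen L (L.length : Int) (m : Int)) (d, P)).1.get? q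
      = if q ∈ P ∧ (q.length : Int) ∈ lns ∧ q <+: L.drop m
        then some (m : Int) else d.get? q := by
  induction lns generalizing d P with
  | nil =>
    constructor
    · rw [List.foldl_nil]
      symm
      apply List.filter_eq_self.mpr
      intro p _
      simp
    · intro q
      rw [List.foldl_nil, if_neg (by rintro ⟨-, h, -⟩; simp at h)]
  | cons l lns ih =>
    have hl0 : 0 ≤ l := h0 l (List.mem_cons_self)
    have h0' : ∀ l' ∈ lns, 0 ≤ l' := fun l' hl' => h0 l' (List.mem_cons_of_mem _ hl')
    set k := l.toNat with hk
    have hlk : l = (k : Int) := by omega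
    by_cases hbound : (m : Int) + l ≤ (L.length : Int)
    · -- the window fits
      have hkn : m + k ≤ L.length := by omega
      have hseg : PySem.List.slice L (some (m : Int)) (some ((m : Int) + l))
          = (L.drop m).take k := by
        rw [hlk, PySem.List.slice_natCast_add]
      set seg := (L.drop m).take k with hsegdef
      have hseglen : seg.length = k := by
        rw [hsegdef, List.length_take, List.length_drop]; omega
      have hsegpre : seg <+: L.drop m := List.take_prefix _ _
      -- only a phrase of length exactly l can be this window
      have huniq : ∀ p : List Char, (p.length : Int) = l → p <+: L.drop m → p = seg := by
        intro p hpl hpre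
        have : p.length = k := by omega
        rw [pvSegEq L p m hpre, this]
      have hstep : pvTryLen L (L.length : Int) (m : Int) (d, P) l
          = if seg ∈ P then (d.insert seg (m : Int), PySem.Set.discard P seg) else (d, P) := by
        rw [pvTryLen, if_pos hbound]
        simp only [hseg]
        by_cases hmem : seg ∈ P
        · rw [if_pos hmem, if_pos (by simpa using hmem)]
        · rw [if_neg hmem, if_neg (by simpa using hmem)]
      by_cases hmem : seg ∈ P
      · -- this window is pending: record and retire it
        rw [List.foldl_cons, hstep, if_pos hmem]
        obtain ⟨ihP, ihD⟩ := ih h0' (d.insert seg (m : Int)) (PySem.Set.discard P seg)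
        constructor
        · rw [ihP, PySem.Set.discard, List.filter_filter]
          apply List.filter_congr
          intro p hp
          by_cases hpeq : p = seg
          · subst hpeq
            have hcl : ((seg.length : Int) ∈ l :: lns ∧ seg <+: L.drop m) := by
              refine ⟨?_, hsegpre⟩
              rw [hseglen, hlk]; exact List.mem_cons_self
            simp [hcl]
          · have hiff : ((p.length : Int) ∈ lns ∧ p <+: L.drop m)
                ↔ ((p.length : Int) ∈ l :: lns ∧ p <+: L.drop m) := by
              constructor
              · rintro ⟨h1, h2⟩; exact ⟨List.mem_cons_of_mem _ h1, h2⟩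
              · rintro ⟨h1, h2⟩
                rcases List.mem_cons.mp h1 with h1 | h1
                · exact absurd (huniq p h1 h2) hpeq
                · exact ⟨h1, h2⟩
            have hb : (!(p == seg)) = true := by simpa using hpeq
            rw [decide_eq_decide.mpr hiff] <;> try infer_instance
            simp [hb]
        · intro q
          rw [ihD]
          by_cases hq : q ∈ P ∧ (q.length : Int) ∈ l :: lns ∧ q <+: L.drop m
          · rw [if_pos hq]
            obtain ⟨hqP, hql, hqpre⟩ := hq
            by_cases hqeq : q = seg
            · subst hqeq
              rw [if_neg (by
                  rintro ⟨hqd, -⟩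
                  rw [PySem.Set.discard, List.mem_filter] at hqd
                  simp at hqd),
                PySem.Dict.get?_insert, if_pos rfl]
            · rcases List.mem_cons.mp hql with h1 | h1
              · exact absurd (huniq q h1 hqpre) hqeq
              · rw [if_pos ⟨by
                    rw [PySem.Set.discard, List.mem_filter]
                    exact ⟨hqP, by simpa using hqeq⟩, h1, hqpre⟩]
          · rw [if_neg hq, if_neg (by
                rintro ⟨hqd, h1, h2⟩
                rw [PySem.Set.discard, List.mem_filter] at hqd
                exact hq ⟨hqd.1, List.mem_cons_of_mem _ h1, h2⟩)]
            have hqeq : q ≠ seg := by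
              rintro rfl
              exact hq ⟨hmem, by rw [hseglen, hlk]; exact List.mem_cons_self, hsegpre⟩
            rw [PySem.Dict.get?_insert, if_neg hqeq]
      · -- window not pending: nothing of this length is pending and starts here
        rw [List.foldl_cons, hstep, if_neg hmem]
        obtain ⟨ihP, ihD⟩ := ih h0' d P
        have hiff : ∀ p ∈ P, (((p.length : Int) ∈ lns ∧ p <+: L.drop m)
            ↔ ((p.length : Int) ∈ l :: lns ∧ p <+: L.drop m)) := by
          intro p hp
          constructor
          · rintro ⟨h1, h2⟩; exact ⟨List.mem_cons_of_mem _ h1, h2⟩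
          · rintro ⟨h1, h2⟩
            rcases List.mem_cons.mp h1 with h1 | h1
            · exact absurd (huniq p h1 h2 ▸ hp) hmem
            · exact ⟨h1, h2⟩
        constructor
        · rw [ihP]
          apply List.filter_congr
          intro p hp
          rw [decide_eq_decide.mpr (hiff p hp)]
        · intro q
          rw [ihD]
          by_cases hq : q ∈ P ∧ (q.length : Int) ∈ lns ∧ q <+: L.drop m
          · rw [if_pos hq, if_pos ⟨hq.1, ((hiff q hq.1).mp hq.2).1,
              hq.2.2⟩]
          · rw [if_neg hq, if_neg (by
                rintro ⟨h1, h2, h3⟩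
                exact hq ⟨h1, ((hiff q h1).mpr ⟨h2, h3⟩).1, h3⟩)]
    · -- the window does not fit: no phrase of this length can start here
      have hnofit : ∀ p : List Char, (p.length : Int) = l → ¬ p <+: L.drop m := by
        intro p hpl hpre
        have := hpre.length_le
        rw [List.length_drop] at this
        omega
      rw [List.foldl_cons, show pvTryLen L (L.length : Int) (m : Int) (d, P) l = (d, P) by
        rw [pvTryLen, if_neg hbound]]
      obtain ⟨ihP, ihD⟩ := ih h0' d P
      have hiff : ∀ p : List Char, (((p.length : Int) ∈ lns ∧ p <+: L.drop m)
          ↔ ((p.length : Int) ∈ l :: lns ∧ p <+: L.drop m)) := by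
        intro p
        constructor
        · rintro ⟨h1, h2⟩; exact ⟨List.mem_cons_of_mem _ h1, h2⟩
        · rintro ⟨h1, h2⟩
          rcases List.mem_cons.mp h1 with h1 | h1
          · exact absurd h2 (hnofit p h1)
          · exact ⟨h1, h2⟩
      constructor
      · rw [ihP]
        apply List.filter_congr
        intro p _
        rw [decide_eq_decide.mpr (hiff p)]
      · intro q
        rw [ihD]
        by_cases hq : q ∈ P ∧ (q.length : Int) ∈ lns ∧ q <+: L.drop m
        · rw [if_pos hq, if_pos ⟨hq.1, ((hiff q).mp hq.2).1, hq.2.2⟩]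
        · rw [if_neg hq, if_neg (by
              rintro ⟨h1, h2, h3⟩
              exact hq ⟨h1, ((hiff q).mpr ⟨h2, h3⟩).1, h3⟩)]

-- the distinct sorted lengths of Source B
def pvLens (kws : List (List Char)) : List Int :=
  PySem.List.sorted
    (PySem.Set.ofList ((PySem.Set.ofList kws).map (fun p => (p.length : Int)))) (fun x => x) false

lemma pvLensMem (kws : List (List Char)) (p : List Char) (hp : p ∈ kws) :
    (p.length : Int) ∈ pvLens kws := by
  rw [pvLens, PySem.List.mem_sorted, PySem.Set.mem_ofList]
  exact List.mem_map_of_mem ((PySem.Set.mem_ofList kws p).mpr hp)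

lemma pvLensNonneg (kws : List (List Char)) : ∀ l ∈ pvLens kws, 0 ≤ l := by
  intro l hl
  rw [pvLens, PySem.List.mem_sorted, PySem.Set.mem_ofList] at hl
  obtain ⟨p, -, rfl⟩ := List.mem_map.mp hl
  positivity

-- the state of B's scan after the first m positions
def pvScSt (L : List Char) (kws : List (List Char)) (m : Nat) :
    PySem.Dict (List Char) Int × PySem.Set (List Char) :=
  (PySem.List.pyRange 0 (m : Int)).foldl
    (fun st pos => (pvLens kws).foldl (pvTryLen L (L.length : Int) pos) st)
    (PySem.Dict.empty, PySem.Set.ofList kws)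

-- loop invariant: the dict maps each already-matched phrase of kws to its first match
-- position (= find), and the pending set holds exactly the distinct never-yet-matched phrases
lemma pvInv (L : List Char) (kws : List (List Char)) (m : Nat) (hm : m ≤ L.length + 1) :
    (∀ q, (pvScSt L kws m).1.get? q
      = if q ∈ kws ∧ ∃ j < m, q <+: L.drop j then some (PySem.Chars.find L q) else none)
    ∧ (pvScSt L kws m).2
      = (PySem.Set.ofList kws).filter (fun p => decide (∀ j < m, ¬ p <+: L.drop j)) := by
  induction m with
  | zero =>
    constructor
    · intro q
      rw [pvScSt, show ((0 : Nat) : Int) = 0 by norm_num,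
        PySem.List.pyRange_one_eq_nil (le_refl 0), List.foldl_nil,
        if_neg (by rintro ⟨-, j, hj, -⟩; omega), PySem.Dict.get?_empty]
    · rw [pvScSt, show ((0 : Nat) : Int) = 0 by norm_num,
        PySem.List.pyRange_one_eq_nil (le_refl 0), List.foldl_nil]
      symm
      apply List.filter_eq_self.mpr
      intro p _
      simp
  | succ m ih =>
    have hm' : m ≤ L.length + 1 := by omega
    have hmn : m ≤ L.length := by omega
    obtain ⟨ih1, ih2⟩ := ih hm'
    have hstep : pvScSt L kws (m + 1)
        = (pvLens kws).foldl (pvTryLen L (L.length : Int) (m : Int)) (pvScSt L kws m) := by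
      rw [pvScSt, pvScSt, show ((m + 1 : Nat) : Int) = (m : Int) + 1 by push_cast; ring,
        PySem.List.pyRange_one_succ_right (by positivity), List.foldl_append]
      rfl
    obtain ⟨hP, hD⟩ := pvInnerLen L m hmn (pvLens kws) (pvLensNonneg kws)
      (pvScSt L kws m).1 (pvScSt L kws m).2
    constructor
    · intro q
      rw [show ((pvScSt L kws m).1, (pvScSt L kws m).2) = pvScSt L kws m from rfl] at hD
      rw [hstep, hD q, ih1, ih2]
      by_cases hq : q ∈ (PySem.Set.ofList kws).filter (fun p => decide (∀ j < m, ¬ p <+: L.drop j))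
          ∧ (q.length : Int) ∈ pvLens kws ∧ q <+: L.drop m
      · have hqP := hq.1
        have hqpre := hq.2.2
        rw [List.mem_filter] at hqP
        have hqkws : q ∈ kws := (PySem.Set.mem_ofList kws q).mp hqP.1
        have hqno' : ∀ j < m, ¬ q <+: L.drop j := by simpa using hqP.2
        rw [if_pos hq, if_pos ⟨hqkws, m, by omega, hqpre⟩,
          pvFindEq L q m hqpre hqno']
      · rw [if_neg hq]
        by_cases hold : q ∈ kws ∧ ∃ j < m, q <+: L.drop j
        · rw [if_pos hold, if_pos ⟨hold.1, hold.2.imp (fun j h => ⟨by omega, h.2⟩)⟩]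
        · rw [if_neg hold, if_neg ?_]
          rintro ⟨hk, j, hj, hp⟩
          rcases Nat.lt_succ_iff_lt_or_eq.mp hj with h' | h'
          · exact hold ⟨hk, j, h', hp⟩
          · subst h'
            have hno : ∀ i < j, ¬ q <+: L.drop i := fun i hi hpi => hold ⟨hk, i, hi, hpi⟩
            exact hq ⟨List.mem_filter.mpr ⟨(PySem.Set.mem_ofList kws q).mpr hk, by simpa using hno⟩,
              pvLensMem kws q hk, hp⟩
    · rw [show ((pvScSt L kws m).1, (pvScSt L kws m).2) = pvScSt L kws m from rfl] at hP
      rw [hstep, hP, ih2, List.filter_filter]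
      apply List.filter_congr
      intro p hp
      have hpk : p ∈ kws := (PySem.Set.mem_ofList kws p).mp hp
      rw [Bool.eq_iff_iff]
      simp only [Bool.and_eq_true, Bool.not_eq_true', decide_eq_true_eq, decide_eq_false_iff_not,
        not_and]
      constructor
      · rintro ⟨hnm, hno⟩ j hj
        rcases Nat.lt_succ_iff_lt_or_eq.mp hj with h' | h'
        · exact hno j h'
        · subst h'
          exact hnm (pvLensMem kws p hpk)
      · intro h
        exact ⟨fun _ => h m (by omega), fun j hj => h j (by omega)⟩

-- ===== VERDICT (by name: the statement is the Claim_ definition above) =====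
theorem find_keyword_hits_py_spec : Claim_equal_find_keyword_hits_py := by
  intro answer keywords _
  unfold Spec_find_keyword_hits_py
  simp only [find_keyword_hits_py, find_keyword_hits_py_alt]
  rw [pvAfold, List.nil_append]
  have hst : (PySem.List.pyRange 0 (((PySem.Str.lower answer).toList.length : Int) + 1)).foldl
      (fun st pos => (pvLens (keywords.map String.toList)).foldl
        (pvTryLen (PySem.Str.lower answer).toList ((PySem.Str.lower answer).toList.length : Int) pos) st)
      (PySem.Dict.empty, PySem.Set.ofList (keywords.map String.toList))
      = pvScSt (PySem.Str.lower answer).toList (keywords.map String.toList)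
          ((PySem.Str.lower answer).toList.length + 1) := by
    rw [pvScSt]
    push_cast
    ring_nf
  rw [pvLens] at hst
  rw [hst, List.filterMap_map]
  obtain ⟨hget, -⟩ := pvInv (PySem.Str.lower answer).toList (keywords.map String.toList)
    ((PySem.Str.lower answer).toList.length + 1) (by omega)
  apply List.filterMap_congr
  intro ph hph
  simp only [Function.comp_apply]
  rw [hget]
  have hmem : ph.toList ∈ keywords.map String.toList := List.mem_map_of_mem hph
  have hfind : PySem.Str.find (PySem.Str.lower answer) ph
      = PySem.Chars.find (PySem.Str.lower answer).toList ph.toList := PySem.Str.find_eq _ _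
  by_cases hex : ∃ j < (PySem.Str.lower answer).toList.length + 1,
      ph.toList <+: (PySem.Str.lower answer).toList.drop j
  · have h0 : 0 ≤ PySem.Chars.find (PySem.Str.lower answer).toList ph.toList :=
      (pvFindNonneg _ _).mp hex
    have hc : ph.toList ∈ keywords.map String.toList ∧ ∃ j < (PySem.Str.lower answer).toList.length + 1,
        ph.toList <+: (PySem.Str.lower answer).toList.drop j := ⟨hmem, hex⟩
    rw [if_pos hc, hfind, if_pos h0]
    simp
  · have h0 : ¬ 0 ≤ PySem.Chars.find (PySem.Str.lower answer).toList ph.toList :=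
      fun h => hex ((pvFindNonneg _ _).mpr h)
    have hc : ¬ (ph.toList ∈ keywords.map String.toList ∧ ∃ j < (PySem.Str.lower answer).toList.length + 1,
        ph.toList <+: (PySem.Str.lower answer).toList.drop j) := fun h => hex h.2
    rw [if_neg hc, hfind, if_neg h0]
    rfl
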